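-- pv_equiv track=rewrite | github.com/dblackrun/pbpstats | pbpstats/resources/enhanced_pbp/start_of_period.py | _split_up_starters_by_team
-- ===== SOURCE A (Python) =====
-- def _split_up_starters_by_team(starters, player_team_map):
--     starters_by_team = {}
--     # for players who don't appear in event as player1 - won't be in player_team_map
--     dangling_starters = []
--     for player_id in starters:
--         team_id = player_team_map.get(player_id)
--         if team_id is not None:
--             if team_id not in starters_by_team.keys():
--                 starters_by_team[team_id] = []
--             starters_by_team[team_id].append(player_id)
--         else:
--             dangling_starters.append(player_id)
--     # if there is one dangling starter we can add it to team missing a starter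
--     if len(dangling_starters) == 1 and len(starters) == 10:
--         for _, team_starters in starters_by_team.items():
--             if len(team_starters) == 4:
--                 team_starters += dangling_starters
--     return starters_by_team
-- ===== SOURCE B (Python) =====
-- def _split_up_starters_by_team(starters, player_team_map):
--     dangling = [p for p in starters if player_team_map.get(p) is None]
--     teams = list(dict.fromkeys(
--         t for t in (player_team_map.get(p) for p in starters) if t is not None))
--     result = {t: [p for p in starters if player_team_map.get(p) == t] for t in teams}
--     if len(dangling) == 1 and len(starters) == 10:
--         result = {t: v + dangling if len(v) == 4 else v for t, v in result.items()}
--     return result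
-- ===== Notes on version B (the rewrite author's own statement) =====
-- stated objective: alternative
-- what changed: Replaces A's single scatter pass that appends each starter into its team's growing dict bucket with a gather-per-team decomposition: first dedup the mapped team ids and collect the dangling starters by filters, then build each team's list by filtering the starters for that team; the dangling fixup becomes a pure rebuild instead of in-place list mutation.
import Mathlib
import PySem

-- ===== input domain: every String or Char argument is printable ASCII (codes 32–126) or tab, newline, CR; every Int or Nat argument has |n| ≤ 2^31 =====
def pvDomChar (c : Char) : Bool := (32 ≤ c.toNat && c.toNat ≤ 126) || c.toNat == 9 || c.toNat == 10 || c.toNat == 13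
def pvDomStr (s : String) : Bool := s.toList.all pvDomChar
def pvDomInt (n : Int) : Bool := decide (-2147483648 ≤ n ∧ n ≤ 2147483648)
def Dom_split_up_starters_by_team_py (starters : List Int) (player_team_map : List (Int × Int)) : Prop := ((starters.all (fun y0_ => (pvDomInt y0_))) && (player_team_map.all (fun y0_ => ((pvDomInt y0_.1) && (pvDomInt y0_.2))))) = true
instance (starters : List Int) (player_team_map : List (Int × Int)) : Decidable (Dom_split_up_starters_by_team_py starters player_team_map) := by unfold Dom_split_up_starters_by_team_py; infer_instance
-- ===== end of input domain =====

-- B replaces A's scatter-into-buckets pass by a gather-per-team decomposition (dedup the team ids, then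
-- filter the starters for each team); same cost, chosen as an alternative decomposition, not for speed.

-- ===== PORT A =====
def split_up_starters_by_team_py (starters : List Int) (player_team_map : List (Int × Int)) : List (Int × List Int) :=
  let m : PySem.Dict Int Int := PySem.Dict.mk player_team_map
  let st := starters.foldl (fun (st : PySem.Dict Int (List Int) × List Int) player_id =>
    match m.get? player_id with
    | some team_id =>
        let d := if st.1.contains team_id = false then st.1.insert team_id [] else st.1
        (d.modify team_id [] (fun l => l ++ [player_id]), st.2)
    | none => (st.1, st.2 ++ [player_id])) (PySem.Dict.empty, [])
  if st.2.length == 1 && starters.length == 10 then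
    st.1.items.map (fun kv => if kv.2.length == 4 then (kv.1, kv.2 ++ st.2) else kv)
  else st.1.items

-- ===== PORT B =====
def split_up_starters_by_team_py_alt (starters : List Int) (player_team_map : List (Int × Int)) : List (Int × List Int) :=
  let m : PySem.Dict Int Int := PySem.Dict.mk player_team_map
  let dangling := starters.filter (fun p => (m.get? p).isNone)
  let teams := PySem.List.dedup (starters.filterMap (fun p => m.get? p))
  let res := teams.map (fun t => (t, starters.filter (fun p => m.get? p == some t)))
  if dangling.length == 1 && starters.length == 10 then
    res.map (fun kv => if kv.2.length == 4 then (kv.1, kv.2 ++ dangling) else kv)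
  else res

-- ===== PRECONDITION & SPEC =====
def Spec_split_up_starters_by_team_py (starters : List Int) (player_team_map : List (Int × Int)) (out : List (Int × List Int)) : Prop := out = split_up_starters_by_team_py_alt starters player_team_map
instance (starters : List Int) (player_team_map : List (Int × Int)) (out : List (Int × List Int)) : Decidable (Spec_split_up_starters_by_team_py starters player_team_map out) := by unfold Spec_split_up_starters_by_team_py; infer_instance

-- ===== CLAIM (what is proved, stated in full; the proofs are below) =====
def Claim_equal_split_up_starters_by_team_py : Prop := ∀ (starters : List Int) (player_team_map : List (Int × Int)), Dom_split_up_starters_by_team_py starters player_team_map → Spec_split_up_starters_by_team_py starters player_team_map (split_up_starters_by_team_py starters player_team_map)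

-- ===== LEMMAS AND PROOFS =====
lemma pv_insert_insert (d : PySem.Dict Int (List Int)) (k : Int) (v : List Int) (h : d.contains k = false) :
    (d.insert k []).insert k v = d.insert k v := by
  apply PySem.Dict.ext
  rw [PySem.Dict.items_insert_of_contains _ v (PySem.Dict.contains_insert_self d k []),
      PySem.Dict.items_insert_of_not_contains _ _ h,
      PySem.Dict.items_insert_of_not_contains _ _ h]
  rw [List.map_append]
  simp only [List.map_cons, List.map_nil, beq_self_eq_true]
  congr 1
  conv_rhs => rw [← List.map_id d.items]
  apply List.map_congr_left
  intro q hq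
  have hne : q.1 ≠ k := by
    intro e
    have hk : k ∈ d.keys := by
      have := PySem.Dict.mem_keys_of_mem_items (d := d) hq
      rwa [e] at this
    rw [← PySem.Dict.contains_iff_mem_keys] at hk
    simp [h] at hk
  simp [hne]

lemma pv_ins_modify (d : PySem.Dict Int (List Int)) (k : Int) (p : Int) :
    (if d.contains k = false then d.insert k [] else d).modify k [] (fun l => l ++ [p])
      = d.modify k [] (fun l => l ++ [p]) := by
  by_cases h : d.contains k = false
  · rw [if_pos h]
    simp only [PySem.Dict.modify, PySem.Dict.getD_insert_self, PySem.Dict.getD_of_not_contains _ _ h]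
    exact pv_insert_insert d k _ h
  · rw [if_neg h]

lemma pv_loopA_eq (g : Int → Option Int) (l : List Int) (d : PySem.Dict Int (List Int)) (dl : List Int) :
    l.foldl (fun (st : PySem.Dict Int (List Int) × List Int) p =>
      match g p with
      | some t =>
          ((if st.1.contains t = false then st.1.insert t [] else st.1).modify t [] (fun l => l ++ [p]), st.2)
      | none => (st.1, st.2 ++ [p])) (d, dl)
    = ((l.filterMap (fun p => (g p).map (fun t => (t, p)))).foldl
          (fun d q => d.modify q.1 [] (fun l => l ++ [q.2])) d,
       dl ++ l.filter (fun p => (g p).isNone)) := by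
  induction l generalizing d dl with
  | nil => simp
  | cons p l ih =>
    rcases h : g p with _ | t
    · simp only [List.foldl_cons, h, List.filterMap_cons, List.filter_cons, Option.map_none,
        Option.isNone_none]
      rw [ih]
      simp
    · simp only [List.foldl_cons, h, List.filterMap_cons, List.filter_cons, Option.map_some,
        Option.isNone_some]
      rw [pv_ins_modify, ih]
      simp

lemma pv_items_eq_keys_map (d : PySem.Dict Int (List Int)) (h : d.keys.Nodup) :
    d.items = d.keys.map (fun k => (k, d.getD k [])) := by
  simp only [PySem.Dict.keys, List.map_map]
  conv_lhs => rw [← List.map_id d.items]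
  apply List.map_congr_left
  intro q hq
  obtain ⟨k, v⟩ := q
  have := PySem.Dict.getD_of_mem_items d hq h []
  simp [this]

lemma pv_map_fst_mapped (g : Int → Option Int) (l : List Int) :
    (l.filterMap (fun p => (g p).map (fun t => (t, p)))).map Prod.fst = l.filterMap g := by
  induction l with
  | nil => rfl
  | cons p l ih =>
    rcases h : g p with _ | t <;> simp [h, ih]

lemma pv_filter_mapped (g : Int → Option Int) (l : List Int) (t : Int) :
    ((l.filterMap (fun p => (g p).map (fun t => (t, p)))).filter (fun q => q.1 == t)).map (fun x => x.2)
      = l.filter (fun p => g p == some t) := by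
  induction l with
  | nil => rfl
  | cons p l ih =>
    rcases h : g p with _ | u
    · simp [h, ih]
    · by_cases e : u = t
      · subst e; simp [h, ih]
      · simp [h, ih, e]

lemma pv_main (g : Int → Option Int) (starters : List Int) :
    (let st := starters.foldl (fun (st : PySem.Dict Int (List Int) × List Int) p =>
        match g p with
        | some t =>
            ((if st.1.contains t = false then st.1.insert t [] else st.1).modify t [] (fun l => l ++ [p]), st.2)
        | none => (st.1, st.2 ++ [p])) (PySem.Dict.empty, [])
     if st.2.length == 1 && starters.length == 10 then
       st.1.items.map (fun kv => if kv.2.length == 4 then (kv.1, kv.2 ++ st.2) else kv)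
     else st.1.items)
    = (let dangling := starters.filter (fun p => (g p).isNone)
       let teams := PySem.List.dedup (starters.filterMap g)
       let res := teams.map (fun t => (t, starters.filter (fun p => g p == some t)))
       if dangling.length == 1 && starters.length == 10 then
         res.map (fun kv => if kv.2.length == 4 then (kv.1, kv.2 ++ dangling) else kv)
       else res) := by
  dsimp only
  rw [pv_loopA_eq g]
  dsimp only
  simp only [List.nil_append]
  have hnodup : ((starters.filterMap (fun p => (g p).map (fun t => (t, p)))).foldl
      (fun d q => d.modify q.1 [] (fun l => l ++ [q.2])) PySem.Dict.empty).keys.Nodup := by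
    have := PySem.Dict.nodup_keys_foldl_modify_key
      (starters.filterMap (fun p => (g p).map (fun t => (t, p)))) Prod.fst []
      (fun _ q l => l ++ [q.2]) PySem.Dict.empty (by simp)
    simpa using this
  have hkeys : ((starters.filterMap (fun p => (g p).map (fun t => (t, p)))).foldl
      (fun d q => d.modify q.1 [] (fun l => l ++ [q.2])) PySem.Dict.empty).keys
      = PySem.List.dedup (starters.filterMap g) := by
    have := PySem.Dict.keys_foldl_modify_key
      (starters.filterMap (fun p => (g p).map (fun t => (t, p)))) Prod.fst []
      (fun _ q l => l ++ [q.2]) PySem.Dict.empty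
    simp only [PySem.Dict.keys_empty] at this
    rw [show (starters.filterMap (fun p => (g p).map (fun t => (t, p)))).map Prod.fst
          = starters.filterMap g from pv_map_fst_mapped g starters] at this
    rw [PySem.List.dedup_eq_ofList, PySem.Set.ofList_eq_foldl]
    simpa [PySem.Set.update] using this
  have hD : ((starters.filterMap (fun p => (g p).map (fun t => (t, p)))).foldl
      (fun d q => d.modify q.1 [] (fun l => l ++ [q.2])) PySem.Dict.empty).items
      = (PySem.List.dedup (starters.filterMap g)).map
          (fun t => (t, starters.filter (fun p => g p == some t))) := by
    rw [pv_items_eq_keys_map _ hnodup, hkeys]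
    apply List.map_congr_left
    intro k hk
    rw [PySem.Dict.getD_foldl_modify_append]
    rw [PySem.Dict.getD_empty, List.nil_append, pv_filter_mapped]
  rw [hD]

-- ===== VERDICT (by name: the statement is the Claim_ definition above) =====
theorem split_up_starters_by_team_py_spec : Claim_equal_split_up_starters_by_team_py := by
  intro starters player_team_map _
  unfold Spec_split_up_starters_by_team_py split_up_starters_by_team_py split_up_starters_by_team_py_alt
  exact pv_main (fun p => (PySem.Dict.mk player_team_map).get? p) starters
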